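-- pv_equiv track=rewrite | github.com/szymonb1/prg-basics | 04-Functions/zadania/7-28.py | f
-- ===== SOURCE A (Python) =====
-- def f(dice):
--     in_row = 0
--     number = 0
--     for n in range(len(dice)):
--         if dice[n] == dice[n-1] and n>0:
--             in_row += 1
--             number = int(dice[n]) if int(dice[n]) > number else number
--         else:
--             in_row = 0
--             continue
--     return number
-- ===== SOURCE B (Python) =====
-- from itertools import groupby
--
-- def f(dice):
--     candidates = [v for v, g in groupby(dice) if len(list(g)) > 1]
--     return max([0] + candidates)
-- ===== Notes on version B (the rewrite author's own statement) =====
-- stated objective: idiomatic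
-- what changed: Replaced the index loop with dead in_row counter and manual running max by an itertools.groupby pass over maximal runs, taking max of the values of runs of length >= 2 with 0 as baseline.
import Mathlib
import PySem

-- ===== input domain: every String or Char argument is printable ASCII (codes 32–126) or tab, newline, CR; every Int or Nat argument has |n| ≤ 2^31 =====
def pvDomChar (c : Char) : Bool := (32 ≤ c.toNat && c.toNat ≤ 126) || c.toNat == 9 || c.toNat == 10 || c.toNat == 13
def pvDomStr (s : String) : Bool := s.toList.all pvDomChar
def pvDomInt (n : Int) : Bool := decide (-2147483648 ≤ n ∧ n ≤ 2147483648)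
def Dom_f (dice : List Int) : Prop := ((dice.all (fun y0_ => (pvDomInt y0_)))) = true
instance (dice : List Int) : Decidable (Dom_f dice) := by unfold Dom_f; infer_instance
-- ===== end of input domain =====

-- B replaces A's index loop (with its dead in_row counter) by a groupby-into-runs pass: idiomatic, same cost.

-- ===== PORT A =====
-- literal port of A's for-loop over range(len(dice)); state = (in_row, number)
def f (dice : List Int) : Int :=
  ((PySem.List.pyRange 0 dice.length 1).foldl
    (fun (st : Int × Int) (n : Int) =>
      if PySem.List.pyGetD dice n 0 = PySem.List.pyGetD dice (n - 1) 0 ∧ n > 0 then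
        (st.1 + 1,
         if PySem.List.pyGetD dice n 0 > st.2 then PySem.List.pyGetD dice n 0 else st.2)
      else (0, st.2))
    (0, 0)).2

-- ===== PORT B =====
-- itertools.groupby dice → maximal runs as (value, length) pairs
def runsAux : Int → Nat → List Int → List (Int × Nat)
  | v, k, [] => [(v, k)]
  | v, k, x :: xs => if x = v then runsAux v (k + 1) xs else (v, k) :: runsAux x 1 xs

def runs : List Int → List (Int × Nat)
  | [] => []
  | x :: xs => runsAux x 1 xs

-- candidates = values of runs of length > 1; max([0] + candidates)
def f_alt (dice : List Int) : Int :=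
  ((runs dice).filterMap (fun r => if r.2 > 1 then some r.1 else none)).foldl max 0

-- ===== PRECONDITION & SPEC =====
def Spec_f (dice : List Int) (out : Int) : Prop := out = f_alt dice
instance (dice : List Int) (out : Int) : Decidable (Spec_f dice out) := by unfold Spec_f; infer_instance

-- ===== CLAIM (what is proved, stated in full; the proofs are below) =====
def Claim_equal_f : Prop := ∀ (dice : List Int), Dom_f dice → Spec_f dice (f dice)

-- ===== LEMMAS AND PROOFS =====

-- common characterization: running max over adjacent equal pairs, floor 0
def pairScan : Int → Int → List Int → Int
  | _, acc, [] => acc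
  | prev, acc, x :: xs => pairScan x (if x = prev then max acc x else acc) xs

theorem runsAux_fold (xs : List Int) : ∀ (v : Int) (k : Nat) (acc : Int), 1 ≤ k →
    ((runsAux v k xs).filterMap (fun r => if r.2 > 1 then some r.1 else none)).foldl max acc
      = pairScan v (if 2 ≤ k then max acc v else acc) xs := by
  induction xs with
  | nil =>
    intro v k acc hk
    by_cases h : 2 ≤ k <;> simp [runsAux, pairScan, h, Nat.lt_iff_add_one_le]
  | cons x xs ih =>
    intro v k acc hk
    by_cases hxv : x = v
    · subst hxv
      rw [runsAux, if_pos rfl, ih x (k + 1) acc (by omega), pairScan, if_pos rfl]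
      have h2 : 2 ≤ k + 1 := by omega
      by_cases h : 2 ≤ k <;>
        simp [h, h2]
    · rw [runsAux, if_neg hxv, pairScan, if_neg hxv]
      by_cases h : 2 ≤ k
      · rw [if_pos h]
        have hih := ih x 1 (max acc v) (le_refl 1)
        norm_num at hih
        simp only [List.filterMap_cons, show ((v,k).2 > 1) = True from by simp; omega, if_true,
          List.foldl_cons, gt_iff_lt]
        exact hih
      · rw [if_neg h]
        have hih := ih x 1 acc (le_refl 1)
        norm_num at hih
        simp only [List.filterMap_cons, show ((v,k).2 > 1) = False from by simp; omega, if_false,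
          gt_iff_lt]
        exact hih

theorem loopA (l : List Int) : ∀ (m j : Nat) (st : Int × Int),
    l.length - j = m → 1 ≤ j → j ≤ l.length →
    ((PySem.List.pyRange (j : Int) (l.length : Int) 1).foldl
      (fun (st : Int × Int) (n : Int) =>
        if PySem.List.pyGetD l n 0 = PySem.List.pyGetD l (n - 1) 0 ∧ n > 0 then
          (st.1 + 1,
           if PySem.List.pyGetD l n 0 > st.2 then PySem.List.pyGetD l n 0 else st.2)
        else (0, st.2)) st).2
      = pairScan (l.getD (j - 1) 0) st.2 (l.drop j) := by
  intro m
  induction m with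
  | zero =>
    intro j st hm h1 h2
    have hj : j = l.length := by omega
    subst hj
    rw [PySem.List.pyRange_one_eq_nil (by omega), List.foldl_nil, List.drop_length, pairScan]
  | succ m ih =>
    intro j st hm h1 h2
    have hjl : j < l.length := by omega
    rw [PySem.List.pyRange_one_cons (by exact_mod_cast hjl), List.foldl_cons]
    have hcast : ((j : Int) + 1) = ((j + 1 : Nat) : Int) := by push_cast; ring
    rw [hcast, ih (j + 1) _ (by omega) (by omega) (by omega)]
    have hjpos : ((j : Int) > 0) := by exact_mod_cast h1
    have hsub : ((j : Int) - 1) = ((j - 1 : Nat) : Int) := by omega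
    have hdrop : l.drop j = l.getD j 0 :: l.drop (j + 1) := by
      rw [List.getD_eq_getElem l 0 hjl]
      exact (List.getElem_cons_drop hjl).symm
    rw [hdrop, pairScan, hsub]
    simp only [PySem.List.pyGetD_natCast, Nat.add_sub_cancel]
    by_cases heq : l.getD j 0 = l.getD (j - 1) 0
    · rw [if_pos ⟨heq, hjpos⟩, if_pos heq]
      congr 1
      simp only [max_def]
      split_ifs <;> omega
    · rw [if_neg (by tauto), if_neg heq]

-- ===== VERDICT (by name: the statement is the Claim_ definition above) =====
theorem f_spec : Claim_equal_f := by
  intro dice _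
  unfold Spec_f f f_alt
  cases dice with
  | nil => simp [runs, PySem.List.pyRange_one_eq_nil]
  | cons x xs =>
    rw [runs, runsAux_fold xs x 1 0 (le_refl 1), if_neg (by omega : ¬ (2:Nat) ≤ 1)]
    have h0 : (0 : Int) < ((x :: xs).length : Int) := by exact_mod_cast Nat.succ_pos xs.length
    rw [PySem.List.pyRange_one_cons h0, List.foldl_cons]
    simp only [gt_iff_lt, lt_self_iff_false, and_false, if_false]
    rw [show ((0:Int) + 1) = ((1:Nat):Int) from by norm_num]
    have hl := loopA (x :: xs) ((x :: xs).length - 1) 1 (0, 0) rfl (le_refl 1) (by simp)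
    simp only [gt_iff_lt, List.drop_one, List.tail_cons] at hl
    exact hl
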